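-- pv_equiv track=rewrite | github.com/lampcord/RL | AlphaZeroMancala/tic_tac_toe/ttt_game_rules.py | get_encoded_binary
-- ===== SOURCE A (Python) =====
-- symbol_for_player = {
--     0: 1,
--     1: 2
-- }
--
-- def get_encoded_binary(list_state, turn):
--     encoded_state = 0
--     player_1_symbol = symbol_for_player[0]
--     player_2_symbol = symbol_for_player[1]
--     for symbol in (player_1_symbol, player_2_symbol):
--         for cell in list_state:
--             encoded_state *= 2
--             if cell == symbol:
--                 encoded_state += 1
--     return encoded_state
-- ===== SOURCE B (Python) =====
-- symbol_for_player = {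
--     0: 1,
--     1: 2
-- }
--
-- def get_encoded_binary(list_state, turn):
--     m1 = 0
--     m2 = 0
--     for cell in list_state:
--         m1 = m1 * 2 + (1 if cell == symbol_for_player[0] else 0)
--         m2 = m2 * 2 + (1 if cell == symbol_for_player[1] else 0)
--     return (m1 << len(list_state)) + m2
-- ===== Notes on version B (the rewrite author's own statement) =====
-- stated objective: alternative
-- what changed: B replaces A's two sequential passes (one per symbol, sharing a single accumulator) with a single pass that maintains two masks m1 and m2, combined at the end by a closed-form shift (m1 << len) + m2.
import Mathlib
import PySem

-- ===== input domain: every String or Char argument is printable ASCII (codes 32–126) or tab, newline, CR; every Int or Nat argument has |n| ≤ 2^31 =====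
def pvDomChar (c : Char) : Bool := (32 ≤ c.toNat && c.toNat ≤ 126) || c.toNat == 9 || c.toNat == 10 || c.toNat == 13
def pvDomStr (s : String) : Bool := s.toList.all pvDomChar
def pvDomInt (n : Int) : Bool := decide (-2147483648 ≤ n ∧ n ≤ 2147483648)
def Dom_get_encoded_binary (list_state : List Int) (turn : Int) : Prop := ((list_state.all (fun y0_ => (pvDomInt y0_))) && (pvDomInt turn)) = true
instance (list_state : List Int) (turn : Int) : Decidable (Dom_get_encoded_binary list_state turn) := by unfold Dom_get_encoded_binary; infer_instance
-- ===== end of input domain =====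

-- B replaces A's two sequential passes over one accumulator by a single pass keeping
-- two masks, combined with a closed-form shift at the end (objective: alternative).

-- ===== PORT A =====
-- A: for symbol in (1, 2): for cell: encoded *= 2; if cell == symbol: encoded += 1
def get_encoded_binary (list_state : List Int) (turn : Int) : Int :=
  [(1 : Int), 2].foldl
    (fun encoded_state symbol =>
      list_state.foldl
        (fun e cell => (e * 2) + (if cell = symbol then 1 else 0)) encoded_state)
    0

-- ===== PORT B =====
-- B: single pass maintaining (m1, m2); result = m1 * 2^len + m2
def get_encoded_binary_alt (list_state : List Int) (turn : Int) : Int :=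
  let p := list_state.foldl
    (fun (mm : Int × Int) cell =>
      (mm.1 * 2 + (if cell = 1 then 1 else 0), mm.2 * 2 + (if cell = 2 then 1 else 0)))
    (0, 0)
  p.1 * 2 ^ list_state.length + p.2

-- ===== PRECONDITION & SPEC =====
def Spec_get_encoded_binary (list_state : List Int) (turn : Int) (out : Int) : Prop := out = get_encoded_binary_alt list_state turn
instance (list_state : List Int) (turn : Int) (out : Int) : Decidable (Spec_get_encoded_binary list_state turn out) := by unfold Spec_get_encoded_binary; infer_instance

-- ===== CLAIM (what is proved, stated in full; the proofs are below) =====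
def Claim_equal_get_encoded_binary : Prop := ∀ (list_state : List Int) (turn : Int), Dom_get_encoded_binary list_state turn → Spec_get_encoded_binary list_state turn (get_encoded_binary list_state turn)

-- ===== LEMMAS AND PROOFS =====

-- one pass for symbol s starting from acc = acc shifted past the list plus the pass from 0
theorem pv_pass_shift (s : Int) (xs : List Int) (acc : Int) :
    xs.foldl (fun e cell => (e * 2) + (if cell = s then 1 else 0)) acc
      = acc * 2 ^ xs.length
        + xs.foldl (fun e cell => (e * 2) + (if cell = s then 1 else 0)) 0 := by
  induction xs generalizing acc with
  | nil => simp
  | cons x t ih =>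
    simp only [List.foldl_cons, List.length_cons]
    rw [ih (acc * 2 + (if x = s then 1 else 0)), ih ((0:Int) * 2 + (if x = s then 1 else 0))]
    ring

-- B's pair fold computes the two single-symbol passes
theorem pv_pair_fold (xs : List Int) (a b : Int) :
    xs.foldl
      (fun (mm : Int × Int) cell =>
        (mm.1 * 2 + (if cell = 1 then 1 else 0), mm.2 * 2 + (if cell = 2 then 1 else 0)))
      (a, b)
      = (xs.foldl (fun e cell => (e * 2) + (if cell = (1:Int) then 1 else 0)) a,
         xs.foldl (fun e cell => (e * 2) + (if cell = (2:Int) then 1 else 0)) b) := by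
  induction xs generalizing a b with
  | nil => rfl
  | cons x t ih => simp only [List.foldl_cons]; exact ih _ _

-- ===== VERDICT (by name: the statement is the Claim_ definition above) =====
theorem get_encoded_binary_spec : Claim_equal_get_encoded_binary := by
  intro list_state turn _
  unfold Spec_get_encoded_binary get_encoded_binary get_encoded_binary_alt
  simp only [List.foldl_cons, List.foldl_nil, pv_pair_fold]
  rw [pv_pass_shift]
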